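-- pv_equiv track=rewrite | github.com/NiWoj/public | Utilities/Timeline_Versioning.py | increment_letter
-- ===== SOURCE A (Python) =====
-- def increment_letter(label):
--     letters = list(label)
--     i = len(letters) - 1
--
--     while i >= 0:
--         if letters[i] != 'Z':
--             letters[i] = chr(ord(letters[i]) + 1)
--             return ''.join(letters)
--         else:
--             letters[i] = 'A'
--             i -= 1
--
--     # All were Zs, add a new letter at the front
--     return 'A' + ''.join(letters)
-- ===== SOURCE B (Python) =====
-- def increment_letter(label):
--     if not label:
--         return 'A'
--     last = label[-1]
--     if last != 'Z':
--         return label[:-1] + chr(ord(last) + 1)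
--     return increment_letter(label[:-1]) + 'A'
-- ===== Notes on version B (the rewrite author's own statement) =====
-- stated objective: simpler
-- what changed: Replaces the index-maintaining right-to-left mutation loop over a char list with a short recursion on the string prefix: the base case handles the empty string, a non-carry last character is bumped via ord/chr, and a carrying last character recurses on the prefix.
import Mathlib
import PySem

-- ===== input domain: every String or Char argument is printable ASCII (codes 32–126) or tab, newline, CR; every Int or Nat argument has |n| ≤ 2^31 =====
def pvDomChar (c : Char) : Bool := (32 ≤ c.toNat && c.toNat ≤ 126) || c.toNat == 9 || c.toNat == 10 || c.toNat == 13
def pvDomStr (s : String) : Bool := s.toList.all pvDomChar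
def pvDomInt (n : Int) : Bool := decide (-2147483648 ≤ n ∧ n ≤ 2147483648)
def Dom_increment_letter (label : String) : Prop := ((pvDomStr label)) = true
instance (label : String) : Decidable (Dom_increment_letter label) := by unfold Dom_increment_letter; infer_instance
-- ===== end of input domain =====

-- B replaces A's index-maintaining right-to-left mutation loop with a short recursion on the
-- string prefix (objective: simpler). Both are total; return values agree on all inputs.

-- ===== PORT A =====
-- The while-loop of A, recursing on i+1 (n = 0 means i = -1 has been reached).
def incLetterLoop (letters : List Char) : Nat → String
  | 0 => "A" ++ String.ofList letters
  | n + 1 =>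
    let c := letters.getD n 'A'   -- letters[n]; always in range on A's execution (n < letters.length)
    if c ≠ 'Z' then String.ofList (letters.set n (Char.ofNat (c.toNat + 1)))
    else incLetterLoop (letters.set n 'A') n

def increment_letter (label : String) : String :=
  incLetterLoop label.toList label.toList.length

-- ===== PORT B =====
-- recursion on the prefix label[:-1], inspecting the last character (carry case recurses)
def incAltList (l : List Char) : List Char :=
  if h : l = [] then ['A']
  else
    let c := l.getLast h
    if c ≠ 'Z' then l.dropLast ++ [Char.ofNat (c.toNat + 1)]
    else incAltList l.dropLast ++ ['A']
termination_by l.length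
decreasing_by
  have := List.length_pos_of_ne_nil h
  simp [List.length_dropLast]
  omega

def increment_letter_alt (label : String) : String :=
  String.ofList (incAltList label.toList)

-- ===== PRECONDITION & SPEC =====
def Spec_increment_letter (label : String) (out : String) : Prop := out = increment_letter_alt label
instance (label : String) (out : String) : Decidable (Spec_increment_letter label out) := by unfold Spec_increment_letter; infer_instance

-- ===== CLAIM (what is proved, stated in full; the proofs are below) =====
def Claim_equal_increment_letter : Prop := ∀ (label : String), Dom_increment_letter label → Spec_increment_letter label (increment_letter label)

-- ===== LEMMAS AND PROOFS =====

theorem incAltList_concat (xs : List Char) (x : Char) :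
    incAltList (xs ++ [x]) =
      (if x ≠ 'Z' then xs ++ [Char.ofNat (x.toNat + 1)] else incAltList xs ++ ['A']) := by
  rw [incAltList]
  simp

-- loop invariant: running A's loop on pre ++ suf with i = pre.length - 1 yields B's answer for pre
-- followed by suf (suf holds the 'A's already written over trailing 'Z's).
theorem incLetterLoop_eq (pre suf : List Char) :
    incLetterLoop (pre ++ suf) pre.length = String.ofList (incAltList pre ++ suf) := by
  induction pre using List.reverseRecOn generalizing suf with
  | nil =>
    simp only [List.length_nil, incLetterLoop, List.nil_append]
    rw [incAltList]
    simp only [List.singleton_append, reduceDIte]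
    rw [show ("A" : String) = String.ofList ['A'] from rfl]
    exact (String.ofList_append (l₁ := ['A'])).symm
  | append_singleton xs x ih =>
    rw [incAltList_concat]
    by_cases hx : x = 'Z'
    · subst hx
      have hset : (xs ++ ('Z' :: suf)).set xs.length 'A' = xs ++ ('A' :: suf) := by
        rw [show xs ++ ('Z' :: suf) = xs ++ ['Z'] ++ suf by simp]
        simp
      simp only [List.length_append, List.length_singleton, incLetterLoop,
        List.append_assoc, List.singleton_append]
      rw [show (xs ++ ('Z' :: suf)).getD xs.length 'A' = 'Z' by
        simp [List.getD]]
      simp only [ne_eq, not_true_eq_false, ite_false]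
      rw [show (xs ++ ('Z' :: suf)).set xs.length 'A' = xs ++ ('A' :: suf) by
        exact hset]
      rw [show (xs ++ ('A' :: suf)) = xs ++ (['A'] ++ suf) by simp]
      rw [ih (['A'] ++ suf)]
      simp
    · simp only [List.length_append, List.length_singleton, incLetterLoop,
        List.append_assoc, List.singleton_append]
      rw [show (xs ++ (x :: suf)).getD xs.length 'A' = x by
        simp [List.getD]]
      rw [if_pos hx]
      rw [show (xs ++ (x :: suf)).set xs.length (Char.ofNat (x.toNat + 1))
            = xs ++ (Char.ofNat (x.toNat + 1) :: suf) by simp]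
      simp [hx]

-- ===== VERDICT (by name: the statement is the Claim_ definition above) =====
theorem increment_letter_spec : Claim_equal_increment_letter := by
  intro label _
  unfold Spec_increment_letter increment_letter increment_letter_alt
  have := incLetterLoop_eq label.toList []
  simpa using this
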